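-- pv_equiv track=rewrite | github.com/pypi-data/pypi-mirror-40 | packages/django-oscar-moysklad/django_oscar_moysklad-0.2.1-py3-none-any.whl/django-oscar-moysklad/synchroniser/util/filter_util.py | filter_ids_list
-- ===== SOURCE A (Python) =====
-- def filter_ids_list(sync_ids, param_name, limit=100):
--     filter_list = []
--     counter = 0
--     filter_param = ''
--     for id in sync_ids:
--         filter_param += param_name + '=' + id[0] + ';'
--         counter += 1
--         if counter >= limit:
--             filter_list.append(filter_param)
--             filter_param = ''
--             counter = 0
--
--     if filter_param != '':
--         filter_list.append(filter_param)
--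
--     return filter_list
-- ===== SOURCE B (Python) =====
-- def filter_ids_list(sync_ids, param_name, limit=100):
--     ids = list(sync_ids)
--     size = max(1, limit)  # A flushes after every element when limit < 1
--     filter_list = []
--     while ids:
--         chunk, ids = ids[:size], ids[size:]
--         filter_list.append(''.join(param_name + '=' + id[0] + ';' for id in chunk))
--     return filter_list
-- ===== Notes on version B (the rewrite author's own statement) =====
-- stated objective: simpler
-- what changed: B drops A's running counter and mid-loop flush of a growing string: it slices the id list into explicit chunks of size max(1, limit) and joins each chunk's 'param=id;' pieces in one step, the remainder falling out as the final shorter chunk.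
import Mathlib
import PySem

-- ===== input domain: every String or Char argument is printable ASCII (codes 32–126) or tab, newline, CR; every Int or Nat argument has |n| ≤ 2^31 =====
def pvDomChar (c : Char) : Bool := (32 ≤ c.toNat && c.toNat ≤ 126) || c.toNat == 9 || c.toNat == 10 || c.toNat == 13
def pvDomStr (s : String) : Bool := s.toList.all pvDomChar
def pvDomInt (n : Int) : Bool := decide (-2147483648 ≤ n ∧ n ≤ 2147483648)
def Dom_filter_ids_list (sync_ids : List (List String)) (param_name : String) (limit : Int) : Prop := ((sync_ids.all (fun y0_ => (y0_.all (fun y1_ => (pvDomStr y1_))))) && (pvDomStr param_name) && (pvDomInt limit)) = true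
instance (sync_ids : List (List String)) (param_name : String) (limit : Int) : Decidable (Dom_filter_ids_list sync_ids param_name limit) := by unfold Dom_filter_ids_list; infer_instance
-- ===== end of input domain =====

-- B replaces A's running counter / mid-loop flush with explicit take/drop chunking of
-- size max(1, limit); objective: simpler (no measured speed difference).

-- ===== PORT A =====
-- the body of A's for-loop over (filter_list, counter, filter_param);
-- id[0] is PySem.List.pyGet? (IndexError = none, excluded by Pre_, .getD "" never read)
def pvAStep (param_name : String) (limit : Int)
    (st : List String × Int × String) (id : List String) : List String × Int × String :=
  let fp := st.2.2 ++ (param_name ++ "=" ++ ((PySem.List.pyGet? id 0).getD "") ++ ";")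
  let c := st.2.1 + 1
  if limit ≤ c then (st.1 ++ [fp], 0, "") else (st.1, c, fp)

def filter_ids_list (sync_ids : List (List String)) (param_name : String) (limit : Int) : List String :=
  let s := sync_ids.foldl (pvAStep param_name limit) ([], 0, "")
  if s.2.2 = "" then s.1 else s.1 ++ [s.2.2]

-- ===== PORT B =====
-- param_name + '=' + id[0] + ';'  (same IndexError convention as A's port)
def pvItem (param_name : String) (id : List String) : String :=
  param_name ++ "=" ++ ((PySem.List.pyGet? id 0).getD "") ++ ";"

-- ''.join(param_name + '=' + id[0] + ';' for id in chunk)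
def pvChunkStr (param_name : String) (chunk : List (List String)) : String :=
  PySem.Str.join "" (chunk.map (pvItem param_name))

-- Source B's while-loop; the chunk size max(1, limit) ≥ 1 is encoded as s1 + 1,
-- so chunk = ids[:s1+1] = x :: rest.take s1 and ids[s1+1:] = rest.drop s1
def pvAltLoop (param_name : String) (s1 : Nat) :
    List (List String) → List String → List String
  | [], acc => acc
  | x :: rest, acc =>
      pvAltLoop param_name s1 (rest.drop s1)
        (acc ++ [pvChunkStr param_name (x :: rest.take s1)])
  termination_by ids _ => ids.length
  decreasing_by simp

def filter_ids_list_alt (sync_ids : List (List String)) (param_name : String) (limit : Int) : List String :=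
  pvAltLoop param_name ((max 1 limit).toNat - 1) sync_ids []

-- ===== PRECONDITION & SPEC =====
-- Pre_ excludes inputs where A raises IndexError: some id in sync_ids is an empty list (id[0]).
def Pre_filter_ids_list (sync_ids : List (List String)) (param_name : String) (limit : Int) : Prop :=
  ∀ id ∈ sync_ids, id ≠ []
instance (sync_ids : List (List String)) (param_name : String) (limit : Int) : Decidable (Pre_filter_ids_list sync_ids param_name limit) := by unfold Pre_filter_ids_list; infer_instance
def pvWitness_filter_ids_list : List (List String) × String × Int := ([["a"], ["b"], ["c"]], "id", 2)

def Spec_filter_ids_list (sync_ids : List (List String)) (param_name : String) (limit : Int) (out : List String) : Prop := out = filter_ids_list_alt sync_ids param_name limit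
instance (sync_ids : List (List String)) (param_name : String) (limit : Int) (out : List String) : Decidable (Spec_filter_ids_list sync_ids param_name limit out) := by unfold Spec_filter_ids_list; infer_instance

-- ===== CLAIM (what is proved, stated in full; the proofs are below) =====
def Claim_equal_filter_ids_list : Prop := ∀ (sync_ids : List (List String)) (param_name : String) (limit : Int), Dom_filter_ids_list sync_ids param_name limit → Pre_filter_ids_list sync_ids param_name limit → Spec_filter_ids_list sync_ids param_name limit (filter_ids_list sync_ids param_name limit)

-- ===== LEMMAS AND PROOFS =====

theorem pvJoin_cons (a : String) (l : List String) :
    PySem.Str.join "" (a :: l) = a ++ PySem.Str.join "" l := by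
  have h : ∀ (c : List Char) (m : List (List Char)),
      PySem.Chars.join [] (c :: m) = c ++ PySem.Chars.join [] m := by
    intro c m; cases m <;> simp [PySem.Chars.join, List.intercalate]
  simp [PySem.Str.join, h]

theorem pvChunkStr_nil (pn : String) : pvChunkStr pn [] = "" := by
  simp [pvChunkStr, PySem.Str.join, PySem.Chars.join, List.intercalate]

theorem pvChunkStr_cons (pn : String) (x : List String) (l : List (List String)) :
    pvChunkStr pn (x :: l) = pvItem pn x ++ pvChunkStr pn l := by
  simp [pvChunkStr, pvJoin_cons]

theorem pvChunkStr_ne_empty (pn : String) (x : List String) (l : List (List String)) :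
    pvChunkStr pn (x :: l) ≠ "" := by
  rw [pvChunkStr_cons]
  intro h
  have h2 := congrArg String.toList h
  simp [pvItem] at h2

-- running A's loop from a chunk boundary: with r slots left in the current chunk
-- (counter c = max 1 limit - r), it either ends mid-chunk or flushes after r elements
theorem pvRun (pn : String) (limit : Int) :
    ∀ (r : Nat) (ids : List (List String)) (acc : List String) (c : Int) (p : String),
      1 ≤ r → c = max 1 limit - r → 0 ≤ c →
      ids.foldl (pvAStep pn limit) (acc, c, p) =
        if ids.length < r then (acc, c + ids.length, p ++ pvChunkStr pn ids)
        else (ids.drop r).foldl (pvAStep pn limit) (acc ++ [p ++ pvChunkStr pn (ids.take r)], 0, "") := by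
  intro r
  induction r with
  | zero => intro _ _ _ _ h1; omega
  | succ r ih =>
    intro ids acc c p _ hc hc0
    cases ids with
    | nil => simp [pvChunkStr_nil]
    | cons x rest =>
      have hmax : max 1 limit = 1 ∨ (max 1 limit = limit ∧ 1 ≤ limit) := by omega
      have hid : pn ++ "=" ++ (PySem.List.pyGet? x 0).getD "" ++ ";" = pvItem pn x := rfl
      rcases Nat.eq_zero_or_pos r with hr0 | hr1
      · -- last slot: the step flushes
        subst hr0
        have hflush : limit ≤ c + 1 := by omega
        simp only [List.foldl_cons, pvAStep, hflush, if_pos, hid]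
        have : ¬ (x :: rest).length < 1 := by simp
        simp [pvChunkStr_cons, pvChunkStr_nil]
      · -- room left: the step does not flush
        have hnof : ¬ limit ≤ c + 1 := by omega
        simp only [List.foldl_cons, pvAStep, hnof, if_neg, not_false_iff, hid]
        rw [ih rest acc (c + 1) (p ++ pvItem pn x) hr1 (by omega) (by omega)]
        by_cases hl : rest.length < r
        · have hl2 : (x :: rest).length < r + 1 := by simp; omega
          simp only [hl, if_pos, hl2, pvChunkStr_cons]
          simp only [Prod.mk.injEq, List.length_cons, String.append_assoc]
          exact ⟨trivial, by omega, trivial⟩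
        · have hl2 : ¬ (x :: rest).length < r + 1 := by simp; omega
          simp only [hl, if_neg, not_false_iff, hl2]
          rw [List.drop_succ_cons, List.take_succ_cons, pvChunkStr_cons, String.append_assoc]

-- from a chunk boundary, A's finished loop is B's chunking loop
theorem pvMain (pn : String) (limit : Int) :
    ∀ (n : Nat) (ids : List (List String)) (acc : List String), ids.length ≤ n →
      (let s := ids.foldl (pvAStep pn limit) (acc, 0, "")
       if s.2.2 = "" then s.1 else s.1 ++ [s.2.2]) =
      pvAltLoop pn ((max 1 limit).toNat - 1) ids acc := by
  intro n
  induction n with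
  | zero =>
    intro ids acc h
    have : ids = [] := by cases ids <;> simp_all
    subst this
    simp [pvAltLoop]
  | succ n ih =>
    intro ids acc hlen
    cases ids with
    | nil => simp [pvAltLoop]
    | cons x rest =>
      have hm1 : (1:Int) ≤ max 1 limit := le_max_left _ _
      set s1 : Nat := (max 1 limit).toNat - 1 with hs1
      have hcast : ((s1 + 1 : Nat) : Int) = max 1 limit := by
        have := Int.toNat_of_nonneg (le_trans (by norm_num) hm1)
        have h1 : 1 ≤ (max 1 limit).toNat := by omega
        push_cast
        omega
      have h0 : (0:Int) = max 1 limit - (s1 + 1) := by omega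
      rw [pvRun pn limit (s1 + 1) (x :: rest) acc 0 "" (by omega) h0 le_rfl]
      by_cases hl : (x :: rest).length < s1 + 1
      · have hrest : rest.length ≤ s1 := by simp at hl; omega
        have hdrop : rest.drop s1 = [] := List.drop_eq_nil_of_le hrest
        have htake : rest.take s1 = rest := List.take_of_length_le hrest
        simp only [hl, if_pos]
        simp only [String.empty_append]
        rw [if_neg (pvChunkStr_ne_empty pn x rest)]
        rw [pvAltLoop, htake, hdrop, pvAltLoop]
      · simp only [hl, if_neg, not_false_iff]
        rw [List.drop_succ_cons, List.take_succ_cons]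
        have hlen2 : (rest.drop s1).length ≤ n := by
          simp at hlen ⊢; omega
        rw [ih (rest.drop s1) _ hlen2]
        simp only [String.empty_append]
        rw [pvAltLoop]

-- ===== VERDICT (by name: the statement is the Claim_ definition above) =====
theorem filter_ids_list_spec : Claim_equal_filter_ids_list := by
  intro sync_ids param_name limit _ _
  unfold Spec_filter_ids_list filter_ids_list filter_ids_list_alt
  exact pvMain param_name limit sync_ids.length sync_ids [] le_rfl
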